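-- pv_equiv track=rewrite | github.com/AqibHasnain/NAND | gene_sets.py | get_ara_lac_genes
-- ===== SOURCE A (Python) =====
-- def get_ara_lac_genes(all_genes_filter):
--     '''
--     all_genes_filter: list of gene names in same order as df_tpm_filter
--     '''
--     lac_inds = [ii for ii,this_gene in enumerate(all_genes_filter) if 'lac' in this_gene]
--     ara_inds = [ii for ii,this_gene in enumerate(all_genes_filter) if 'ara' in this_gene]
--     lac_genes = [this_gene for ii,this_gene in enumerate(all_genes_filter) if 'lac' in this_gene]
--     ara_genes = [this_gene for ii,this_gene in enumerate(all_genes_filter) if 'ara' in this_gene]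
--     my_genes = ara_genes + lac_genes
--     my_inds = ara_inds + lac_inds
--     return my_genes, my_inds
-- ===== SOURCE B (Python) =====
-- def get_ara_lac_genes(all_genes_filter):
--     '''
--     all_genes_filter: list of gene names in same order as df_tpm_filter
--     '''
--     ara_inds, ara_genes, lac_inds, lac_genes = [], [], [], []
--     for ii, this_gene in enumerate(all_genes_filter):
--         if 'ara' in this_gene:
--             ara_inds.append(ii)
--             ara_genes.append(this_gene)
--         if 'lac' in this_gene:
--             lac_inds.append(ii)
--             lac_genes.append(this_gene)
--     return ara_genes + lac_genes, ara_inds + lac_inds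
-- ===== Notes on version B (the rewrite author's own statement) =====
-- stated objective: faster
-- what changed: Replaces four separate enumerate scans (one per comprehension) with a single loop that maintains four accumulators, testing 'ara' and 'lac' independently per gene and concatenating ara-before-lac at the end.
import Mathlib
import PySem

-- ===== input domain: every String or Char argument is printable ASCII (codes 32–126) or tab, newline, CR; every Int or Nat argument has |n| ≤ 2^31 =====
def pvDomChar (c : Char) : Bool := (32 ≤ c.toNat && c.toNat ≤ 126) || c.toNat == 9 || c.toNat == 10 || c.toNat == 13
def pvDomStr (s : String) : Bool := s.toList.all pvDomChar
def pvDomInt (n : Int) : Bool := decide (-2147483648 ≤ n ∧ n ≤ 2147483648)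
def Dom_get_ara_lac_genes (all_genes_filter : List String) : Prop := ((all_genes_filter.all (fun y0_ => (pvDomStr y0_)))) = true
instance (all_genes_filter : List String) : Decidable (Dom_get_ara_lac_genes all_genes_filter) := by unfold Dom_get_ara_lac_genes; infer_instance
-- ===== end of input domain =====

-- B replaces A's four separate enumerate scans with a single loop maintaining four accumulators (objective: simpler).

-- ===== PORT A =====
-- Each Python comprehension over enumerate(...) is a filter of the enumerated list followed by a map.
def get_ara_lac_genes (all_genes_filter : List String) : List String × List Int :=
  let e := PySem.List.enumerate all_genes_filter
  let lac_inds := (e.filter (fun p => PySem.Str.isIn "lac" p.2)).map (fun p => p.1)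
  let ara_inds := (e.filter (fun p => PySem.Str.isIn "ara" p.2)).map (fun p => p.1)
  let lac_genes := (e.filter (fun p => PySem.Str.isIn "lac" p.2)).map (fun p => p.2)
  let ara_genes := (e.filter (fun p => PySem.Str.isIn "ara" p.2)).map (fun p => p.2)
  let my_genes := ara_genes ++ lac_genes
  let my_inds := ara_inds ++ lac_inds
  (my_genes, my_inds)

-- ===== PORT B =====
-- One pass over enumerate(all_genes_filter) with four accumulators; both substring tests per gene.
def altStep (st : List Int × List String × List Int × List String) (p : Int × String) :
    List Int × List String × List Int × List String :=
  let (ai, ag, li, lg) := st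
  let (ai, ag) := if PySem.Str.isIn "ara" p.2 then (ai ++ [p.1], ag ++ [p.2]) else (ai, ag)
  let (li, lg) := if PySem.Str.isIn "lac" p.2 then (li ++ [p.1], lg ++ [p.2]) else (li, lg)
  (ai, ag, li, lg)

def get_ara_lac_genes_alt (all_genes_filter : List String) : List String × List Int :=
  let st := (PySem.List.enumerate all_genes_filter).foldl altStep ([], [], [], [])
  (st.2.1 ++ st.2.2.2, st.1 ++ st.2.2.1)

-- ===== PRECONDITION & SPEC =====
def Spec_get_ara_lac_genes (all_genes_filter : List String) (out : List String × List Int) : Prop := out = get_ara_lac_genes_alt all_genes_filter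
instance (all_genes_filter : List String) (out : List String × List Int) : Decidable (Spec_get_ara_lac_genes all_genes_filter out) := by unfold Spec_get_ara_lac_genes; infer_instance

-- ===== CLAIM (what is proved, stated in full; the proofs are below) =====
def Claim_equal_get_ara_lac_genes : Prop := ∀ (all_genes_filter : List String), Dom_get_ara_lac_genes all_genes_filter → Spec_get_ara_lac_genes all_genes_filter (get_ara_lac_genes all_genes_filter)

-- ===== LEMMAS AND PROOFS =====
theorem altStep_foldl (l : List (Int × String)) (ai : List Int) (ag : List String)
    (li : List Int) (lg : List String) :
    l.foldl altStep (ai, ag, li, lg) =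
      (ai ++ (l.filter (fun p => PySem.Str.isIn "ara" p.2)).map (fun p => p.1),
       ag ++ (l.filter (fun p => PySem.Str.isIn "ara" p.2)).map (fun p => p.2),
       li ++ (l.filter (fun p => PySem.Str.isIn "lac" p.2)).map (fun p => p.1),
       lg ++ (l.filter (fun p => PySem.Str.isIn "lac" p.2)).map (fun p => p.2)) := by
  induction l generalizing ai ag li lg with
  | nil => simp
  | cons h t ih =>
    simp only [List.foldl_cons, altStep]
    by_cases ha : PySem.Chars.isIn ['a','r','a'] h.2.toList <;>
      by_cases hl : PySem.Chars.isIn ['l','a','c'] h.2.toList <;>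
        simp [PySem.Str.isIn, ha, hl, ih]

-- ===== VERDICT (by name: the statement is the Claim_ definition above) =====
theorem get_ara_lac_genes_spec : Claim_equal_get_ara_lac_genes := by
  intro xs _
  unfold Spec_get_ara_lac_genes get_ara_lac_genes get_ara_lac_genes_alt
  rw [altStep_foldl]
  simp
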